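-- pv_equiv track=rewrite | github.com/xidongc/py_leetcode | array/smart sales(visa).py | deleteProducts
-- ===== SOURCE A (Python) =====
-- import collections
--
-- def deleteProducts(ids, m):
--     # Write your code here
--     if not ids:
--         return 0
--     timesDict = collections.defaultdict(int)
--     for num in ids:
--         timesDict[num] += 1
--     valueList = sorted(list(timesDict.values()))
--     i = 0
--     while i < len(valueList) and m >= valueList[i]:
--         m -= valueList[i]
--         i += 1
--     return len(valueList) - i
-- ===== SOURCE B (Python) =====
-- import collections
--
-- def deleteProducts(ids, m):
--     freqs = sorted(collections.Counter(ids).values())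
--     prefix = []
--     s = 0
--     for f in freqs:
--         s += f
--         prefix.append(s)
--     lo, hi = 0, len(prefix)
--     while lo < hi:
--         mid = (lo + hi) // 2
--         if prefix[mid] <= m:
--             lo = mid + 1
--         else:
--             hi = mid
--     return len(freqs) - lo
-- ===== Notes on version B (the rewrite author's own statement) =====
-- stated objective: alternative
-- what changed: Replaces the defaultdict counting loop and the linear greedy-subtraction scan with collections.Counter, a cumulative prefix-sum table and a hand-written bisect_right binary search for the number of wholly removable groups.
import Mathlib
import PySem

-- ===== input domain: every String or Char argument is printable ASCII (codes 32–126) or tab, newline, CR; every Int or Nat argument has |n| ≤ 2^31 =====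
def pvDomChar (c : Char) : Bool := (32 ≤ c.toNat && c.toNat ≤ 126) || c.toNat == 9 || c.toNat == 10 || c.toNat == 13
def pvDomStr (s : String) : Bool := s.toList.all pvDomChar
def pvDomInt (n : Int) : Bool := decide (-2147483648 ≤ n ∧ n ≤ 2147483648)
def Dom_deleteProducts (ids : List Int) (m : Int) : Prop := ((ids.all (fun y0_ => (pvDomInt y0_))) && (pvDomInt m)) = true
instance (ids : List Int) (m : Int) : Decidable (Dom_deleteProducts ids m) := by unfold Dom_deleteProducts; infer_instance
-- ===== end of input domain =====

-- B replaces A's greedy subtraction scan by a prefix-sum table plus a binary search; alternative decomposition, same result.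

-- ===== PORT A =====
-- A's while loop: i advances while the budget m covers the next smallest frequency
def pvALoop : List Int → Int → Int → Int
  | [], _, i => i
  | v :: rest, m, i => if m ≥ v then pvALoop rest (m - v) (i + 1) else i

def deleteProducts (ids : List Int) (m : Int) : Int :=
  if ids = [] then 0
  else
    let timesDict := ids.foldl (fun d num => d.modify num 0 (· + 1)) PySem.Dict.empty
    let valueList := PySem.List.sorted timesDict.values (fun x => x) false
    (valueList.length : Int) - pvALoop valueList m 0

-- ===== PORT B =====
-- hand-written bisect_right loop of Source B (mid inlined; prefix[mid] is always in range, so pyGetD's default is never used)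
def pvBSearch (pref : List Int) (m : Int) (lo hi : Int) : Int :=
  if h : lo < hi then
    if PySem.List.pyGetD pref (PySem.Int.floordiv (lo + hi) 2) 0 ≤ m then
      pvBSearch pref m (PySem.Int.floordiv (lo + hi) 2 + 1) hi
    else
      pvBSearch pref m lo (PySem.Int.floordiv (lo + hi) 2)
  else lo
termination_by (hi - lo).toNat
decreasing_by
  · have := (PySem.Int.floordiv_two_mid_bounds (le_of_lt h)).1
    omega
  · have : PySem.Int.floordiv (lo + hi) 2 < hi :=
      (PySem.Int.floordiv_lt_iff_lt_mul (by omega)).2 (by omega)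
    omega

def deleteProducts_alt (ids : List Int) (m : Int) : Int :=
  let freqs := PySem.List.sorted (PySem.Dict.counter ids).values (fun x => x) false
  let pf := (freqs.foldl (fun (p : List Int × Int) f => (p.1 ++ [p.2 + f], p.2 + f)) ([], 0)).1
  let lo := pvBSearch pf m 0 (pf.length : Int)
  (freqs.length : Int) - lo

-- ===== PRECONDITION & SPEC =====
def Spec_deleteProducts (ids : List Int) (m : Int) (out : Int) : Prop := out = deleteProducts_alt ids m
instance (ids : List Int) (m : Int) (out : Int) : Decidable (Spec_deleteProducts ids m out) := by unfold Spec_deleteProducts; infer_instance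

-- ===== CLAIM (what is proved, stated in full; the proofs are below) =====
def Claim_equal_deleteProducts : Prop := ∀ (ids : List Int) (m : Int), Dom_deleteProducts ids m → Spec_deleteProducts ids m (deleteProducts ids m)

-- ===== LEMMAS AND PROOFS =====

-- prefix sums of l starting from running total s
def psums : Int → List Int → List Int
  | _, [] => []
  | s, f :: r => (s + f) :: psums (s + f) r

lemma psums_shift (l : List Int) : ∀ (a s : Int), psums (a + s) l = (psums s l).map (a + ·) := by
  induction l with
  | nil => intro a s; simp [psums]
  | cons f r ih =>
      intro a s
      simp only [psums, List.map_cons]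
      rw [show a + s + f = a + (s + f) by ring, ih a (s + f)]

lemma psums_pos (l : List Int) : ∀ (s : Int), (∀ v ∈ l, 1 ≤ v) → ∀ x ∈ psums s l, s < x := by
  induction l with
  | nil => intro s _ x hx; simp [psums] at hx
  | cons f r ih =>
      intro s hpos x hx
      simp only [psums, List.mem_cons] at hx
      have hf : 1 ≤ f := hpos f (by simp)
      rcases hx with rfl | hx
      · omega
      · have := ih (s + f) (fun v hv => hpos v (by simp [hv])) x hx
        omega

lemma pvALoop_shift (l : List Int) : ∀ (m i : Int), pvALoop l m i = i + pvALoop l m 0 := by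
  induction l with
  | nil => intro m i; simp [pvALoop]
  | cons v r ih =>
      intro m i
      simp only [pvALoop]
      split_ifs with h
      · rw [ih (m - v) (i + 1), ih (m - v) (0 + 1)]; ring
      · ring

lemma greedy_eq_countP (l : List Int) : ∀ (m : Int), (∀ v ∈ l, 1 ≤ v) →
    pvALoop l m 0 = ((psums 0 l).countP (fun s => decide (s ≤ m)) : Int) := by
  induction l with
  | nil => intro m _; simp [pvALoop, psums]
  | cons v r ih =>
      intro m hpos
      have hposr : ∀ x ∈ r, (1:Int) ≤ x := fun x hx => hpos x (by simp [hx])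
      have hps : psums 0 (v :: r) = v :: (psums 0 r).map (v + ·) := by
        simp only [psums, zero_add]
        have := psums_shift r v 0
        simpa using this
      rw [hps]
      simp only [pvALoop, List.countP_cons, List.countP_map]
      by_cases h : v ≤ m
      · rw [if_pos (show m ≥ v from h)]
        rw [pvALoop_shift r (m - v) (0 + 1), ih (m - v) hposr]
        have hc : (psums 0 r).countP ((fun s => decide (s ≤ m)) ∘ (fun x => v + x)) =
            (psums 0 r).countP (fun s => decide (s ≤ m - v)) := by
          apply List.countP_congr
          intro a _
          simp only [Function.comp, decide_eq_true_eq]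
          omega
        rw [hc]
        simp only [decide_eq_true_eq, if_pos h]
        push_cast
        ring
      · rw [if_neg (show ¬ m ≥ v from h)]
        have hc0 : (psums 0 r).countP ((fun s => decide (s ≤ m)) ∘ (fun x => v + x)) = 0 := by
          rw [List.countP_eq_zero]
          intro a ha
          have := psums_pos r 0 hposr a ha
          simp only [Function.comp, decide_eq_true_eq]
          omega
        rw [hc0]
        simp only [decide_eq_true_eq, if_neg h]
        simp

lemma prefix_build (l : List Int) : ∀ (acc : List Int) (s : Int),
    (l.foldl (fun (p : List Int × Int) f => (p.1 ++ [p.2 + f], p.2 + f)) (acc, s)).1 = acc ++ psums s l := by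
  induction l with
  | nil => intro acc s; simp [psums]
  | cons f r ih =>
      intro acc s
      simp only [List.foldl_cons]
      rw [ih (acc ++ [s + f]) (s + f)]
      simp [psums]

lemma countP_eq_of_boundary (l : List Int) (p : Int → Bool) :
    ∀ (n : Nat), n ≤ l.length → (∀ (k : Nat) (hk : k < l.length), p l[k] = true ↔ k < n) →
    l.countP p = n := by
  induction l with
  | nil => intro n hn _; simp at hn ⊢; omega
  | cons x r ih =>
      intro n hn hiff
      have h0 := hiff 0 (by simp)
      simp only [List.countP_cons]
      match n with
      | 0 =>
          have hx : ¬ p x = true := fun h => absurd (h0.mp h) (by omega)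
          have hr : r.countP p = 0 := by
            rw [List.countP_eq_zero]
            intro a ha
            obtain ⟨k, hk, rfl⟩ := List.mem_iff_getElem.mp ha
            have := hiff (k + 1) (by simpa using Nat.succ_lt_succ hk)
            simp only [List.getElem_cons_succ] at this
            intro hp; exact absurd (this.mp hp) (by omega)
          simp [hr, hx]
      | n' + 1 =>
          have hx : p x = true := h0.mpr (by omega)
          have hr : r.countP p = n' := by
            apply ih n' (by simpa using hn)
            intro k hk
            have := hiff (k + 1) (by simpa using Nat.succ_lt_succ hk)
            simp only [List.getElem_cons_succ] at this
            constructor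
            · intro hp; have := this.mp hp; omega
            · intro hkn; exact this.mpr (by omega)
          simp [hr, hx]

lemma bs_correct (pref : List Int) (m : Int) (hs : pref.Pairwise (· ≤ ·)) :
    ∀ (n : Nat) (lo hi : Int), (hi - lo).toNat ≤ n → 0 ≤ lo → lo ≤ hi → hi ≤ (pref.length : Int) →
    (∀ (k : Nat) (hk : k < pref.length), (k : Int) < lo → pref[k] ≤ m) →
    (∀ (k : Nat) (hk : k < pref.length), hi ≤ (k : Int) → m < pref[k]) →
    pvBSearch pref m lo hi = (pref.countP (fun s => decide (s ≤ m)) : Int) := by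
  have hmono : ∀ (i j : Nat) (hi' : i < pref.length) (hj : j < pref.length), i ≤ j → pref[i] ≤ pref[j] := by
    intro i j hi' hj hij
    rcases Nat.lt_or_ge i j with h | h
    · exact (List.pairwise_iff_getElem.mp hs) i j hi' hj h
    · have : i = j := by omega
      subst this; rfl
  have hfinal : ∀ (lo : Int), 0 ≤ lo → lo ≤ (pref.length : Int) →
      (∀ (k : Nat) (hk : k < pref.length), (k : Int) < lo → pref[k] ≤ m) →
      (∀ (k : Nat) (hk : k < pref.length), lo ≤ (k : Int) → m < pref[k]) →
      pref.countP (fun s => decide (s ≤ m)) = lo.toNat := by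
    intro lo h0 hl hlow hhigh
    apply countP_eq_of_boundary
    · omega
    · intro k hk
      constructor
      · intro hp
        by_contra hklo
        have := hhigh k hk (by omega)
        simp only [decide_eq_true_eq] at hp
        omega
      · intro hklo
        simp only [decide_eq_true_eq]
        exact hlow k hk (by omega)
  intro n
  induction n with
  | zero =>
      intro lo hi hfuel h0 hlh hhl hlow hhigh
      have heq : lo = hi := by omega
      subst heq
      rw [pvBSearch, dif_neg (by omega : ¬ lo < lo)]
      rw [hfinal lo h0 hhl hlow hhigh]
      omega
  | succ n ih =>
      intro lo hi hfuel h0 hlh hhl hlow hhigh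
      rw [pvBSearch]
      by_cases hlt : lo < hi
      · rw [dif_pos hlt]
        have hb := PySem.Int.floordiv_two_mid_bounds (le_of_lt hlt)
        set mid := PySem.Int.floordiv (lo + hi) 2 with hmid
        have hmidlt : mid < hi := (PySem.Int.floordiv_lt_iff_lt_mul (by omega)).2 (by omega)
        have hmidge : lo ≤ mid := hb.1
        have hmid0 : 0 ≤ mid := le_trans h0 hmidge
        have hmidrange : mid.toNat < pref.length := by omega
        rw [PySem.List.pyGetD_eq_getElem pref 0 hmid0 (by omega)]
        by_cases hc : pref[mid.toNat] ≤ m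
        · rw [if_pos hc]
          apply ih (mid + 1) hi (by omega) (by omega) (by omega) hhl
          · intro k hk hklo
            exact le_trans (hmono k mid.toNat hk hmidrange (by omega)) hc
          · exact hhigh
        · rw [if_neg hc]
          apply ih lo mid (by omega) h0 (by omega) (by omega) hlow
          · intro k hk hkhi
            have := hmono mid.toNat k hmidrange hk (by omega)
            omega
      · rw [dif_neg hlt]
        have heq : lo = hi := by omega
        subst heq
        rw [hfinal lo h0 hhl hlow hhigh]
        omega

-- frequencies produced by A's dict / B's Counter are all ≥ 1
lemma counter_values_pos (ids : List Int) :
    ∀ v ∈ PySem.List.sorted (PySem.Dict.counter ids).values (fun x => x) false, (1:Int) ≤ v := by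
  intro v hv
  rw [PySem.List.mem_sorted] at hv
  have hval : (PySem.Dict.counter ids).values = (PySem.Set.ofList ids).map (fun k => (ids.count k : Int)) := by
    show ((PySem.Dict.counter ids).items).map (·.2) = _
    rw [PySem.Dict.items_counter, List.map_map]
    rfl
  rw [hval, List.mem_map] at hv
  obtain ⟨k, hk, rfl⟩ := hv
  have hmem : k ∈ ids := (PySem.Set.mem_ofList ids k).mp hk
  have : 0 < ids.count k := List.count_pos_iff.mpr hmem
  omega

lemma psums_pairwise (l : List Int) : ∀ (s : Int), (∀ v ∈ l, 1 ≤ v) → (psums s l).Pairwise (· ≤ ·) := by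
  induction l with
  | nil => intro s _; simp [psums]
  | cons f r ih =>
      intro s hpos
      have hposr : ∀ x ∈ r, (1:Int) ≤ x := fun x hx => hpos x (by simp [hx])
      simp only [psums, List.pairwise_cons]
      exact ⟨fun x hx => le_of_lt (psums_pos r (s + f) hposr x hx), ih (s + f) hposr⟩

lemma psums_length (l : List Int) : ∀ (s : Int), (psums s l).length = l.length := by
  induction l with
  | nil => intro s; simp [psums]
  | cons f r ih => intro s; simp [psums, ih]

lemma bs_self (pref : List Int) (m lo : Int) : pvBSearch pref m lo lo = lo := by
  rw [pvBSearch, dif_neg (by omega : ¬ lo < lo)]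

-- ===== VERDICT (by name: the statement is the Claim_ definition above) =====
theorem deleteProducts_spec : Claim_equal_deleteProducts := by
  intro ids m _
  unfold Spec_deleteProducts
  by_cases hnil : ids = []
  · subst hnil
    simp [deleteProducts, deleteProducts_alt, PySem.Dict.counter, PySem.List.sorted, bs_self]
  · simp only [deleteProducts, deleteProducts_alt, if_neg hnil]
    rw [← PySem.Dict.counter_eq_foldl]
    set freqs := PySem.List.sorted (PySem.Dict.counter ids).values (fun x => x) false with hfreqs
    have hpos : ∀ v ∈ freqs, (1:Int) ≤ v := counter_values_pos ids
    have hpref : (freqs.foldl (fun (p : List Int × Int) f => (p.1 ++ [p.2 + f], p.2 + f)) ([], 0)).1 = psums 0 freqs := by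
      simpa using prefix_build freqs [] 0
    rw [hpref]
    have hlen := psums_length freqs 0
    have hbs : pvBSearch (psums 0 freqs) m 0 ((psums 0 freqs).length : Int) =
        ((psums 0 freqs).countP (fun s => decide (s ≤ m)) : Int) := by
      apply bs_correct (psums 0 freqs) m (psums_pairwise freqs 0 hpos)
        ((psums 0 freqs).length) 0 ((psums 0 freqs).length : Int)
        (by omega) (by omega) (by positivity) (by omega)
      · intro k hk hklo; omega
      · intro k hk hkhi; exfalso; omega
    rw [hbs, greedy_eq_countP freqs m hpos]
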